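-- pv_equiv track=rewrite | github.com/wattsjon2/daily-challenges | lemonadeStand.py | lemon
-- ===== SOURCE A (Python) =====
-- def lemon(arr):
--     bills ={5:0,10:0,20:0}
--     for payment in arr:
--         if payment == 5:
--             bills[5] += 1
--         else:
--             change = payment - 5
--             if change == 5:
--                 if bills[5] >= 1:
--                     bills[10] += 1
--                     bills[5] -= 1
--                 else:
--                     return False
--             elif change == 15:
--                 if bills[5] >= 1 and bills[10] >= 1:
--                     bills[5] -= 1
--                     bills[10] -= 1
--                     bills[20] += 1
--                 elif bills[5] >= 3:
--                     bills[5] -= 3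
--                     bills[20] += 1
--                 else:
--                     return False
--
--     return True
-- ===== SOURCE B (Python) =====
-- def lemon(arr):
--     fives = 0
--     tens = 0
--     for payment in arr:
--         if payment == 5:
--             fives += 1
--         elif payment in (10, 20):
--             change = payment - 5
--             while change >= 10 and tens > 0:
--                 change -= 10
--                 tens -= 1
--             while change >= 5 and fives > 0:
--                 change -= 5
--                 fives -= 1
--             if change != 0:
--                 return False
--             if payment == 10:
--                 tens += 1
--     return True
-- ===== Notes on version B (the rewrite author's own statement) =====
-- stated objective: alternative
-- what changed: Replaced A's dict with branch-per-case change ladder (10 needs a 5; 20 needs 10+5 or three 5s) by two integer counters and a generic largest-denomination-first greedy loop (while change >= denom and count > 0) that computes the change for any payment in {10,20}.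
import Mathlib
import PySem

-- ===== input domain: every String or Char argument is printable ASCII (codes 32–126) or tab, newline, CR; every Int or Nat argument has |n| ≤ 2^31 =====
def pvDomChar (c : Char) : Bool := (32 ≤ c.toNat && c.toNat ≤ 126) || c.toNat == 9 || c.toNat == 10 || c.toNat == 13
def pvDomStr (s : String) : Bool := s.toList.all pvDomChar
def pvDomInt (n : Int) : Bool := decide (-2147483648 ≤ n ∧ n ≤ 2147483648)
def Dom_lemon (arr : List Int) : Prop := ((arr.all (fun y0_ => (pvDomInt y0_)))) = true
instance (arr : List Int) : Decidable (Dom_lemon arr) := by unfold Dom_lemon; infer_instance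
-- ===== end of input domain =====

-- B replaces A's hardcoded case ladder with two integer counters and a generic
-- largest-denomination-first greedy change loop; objective: alternative (same cost).

-- ===== PORT A =====
-- A keeps a dict {5:.,10:.,20:.}; bills[k] reads/writes are Dict.getD/modify (keys always present).
def lemonGo (bills : PySem.Dict Int Int) : List Int → Bool
  | [] => true
  | payment :: rest =>
    if payment == 5 then
      lemonGo (bills.modify 5 0 (· + 1)) rest
    else
      let change := payment - 5
      if change == 5 then
        if bills.getD 5 0 ≥ 1 then
          lemonGo ((bills.modify 10 0 (· + 1)).modify 5 0 (· - 1)) rest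
        else false
      else if change == 15 then
        if bills.getD 5 0 ≥ 1 && bills.getD 10 0 ≥ 1 then
          lemonGo (((bills.modify 5 0 (· - 1)).modify 10 0 (· - 1)).modify 20 0 (· + 1)) rest
        else if bills.getD 5 0 ≥ 3 then
          lemonGo ((bills.modify 5 0 (· - 3)).modify 20 0 (· + 1)) rest
        else false
      else lemonGo bills rest

def lemon (arr : List Int) : Bool :=
  lemonGo (((PySem.Dict.empty.insert 5 0).insert 10 0).insert 20 0) arr

-- ===== PORT B =====
-- the inner 'while change >= denom and cnt > 0' loop of Source B (denom > 0 guard is only for termination)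
def drain (denom change cnt : Int) : Int × Int :=
  if h : 0 < denom ∧ denom ≤ change ∧ 0 < cnt then
    drain denom (change - denom) (cnt - 1)
  else (change, cnt)
termination_by change.toNat
decreasing_by omega

def lemonAltGo (fives tens : Int) : List Int → Bool
  | [] => true
  | payment :: rest =>
    if payment == 5 then
      lemonAltGo (fives + 1) tens rest
    else if payment == 10 || payment == 20 then
      let c0 := payment - 5
      let r1 := drain 10 c0 tens
      let r2 := drain 5 r1.1 fives
      if r2.1 ≠ 0 then false
      else lemonAltGo r2.2 (if payment == 10 then r1.2 + 1 else r1.2) rest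
    else lemonAltGo fives tens rest

def lemon_alt (arr : List Int) : Bool := lemonAltGo 0 0 arr

-- ===== PRECONDITION & SPEC =====
def Spec_lemon (arr : List Int) (out : Bool) : Prop := out = lemon_alt arr
instance (arr : List Int) (out : Bool) : Decidable (Spec_lemon arr out) := by unfold Spec_lemon; infer_instance

-- ===== CLAIM (what is proved, stated in full; the proofs are below) =====
def Claim_equal_lemon : Prop := ∀ (arr : List Int), Dom_lemon arr → Spec_lemon arr (lemon arr)

-- ===== LEMMAS AND PROOFS =====
def mkBills (a b c : Int) : PySem.Dict Int Int := PySem.Dict.mk [(5, a), (10, b), (20, c)]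

theorem drain_stop {denom change cnt : Int} (h : ¬ (0 < denom ∧ denom ≤ change ∧ 0 < cnt)) :
    drain denom change cnt = (change, cnt) := by
  rw [drain]; simp [h]

theorem drain_step {denom change cnt : Int} (h : 0 < denom ∧ denom ≤ change ∧ 0 < cnt) :
    drain denom change cnt = drain denom (change - denom) (cnt - 1) := by
  rw [drain]; simp [h]

theorem drain10_5 (b : Int) : drain 10 5 b = (5, b) := by
  rw [drain_stop]; omega

theorem drain10_15 (b : Int) : drain 10 15 b = if 0 < b then (5, b - 1) else (15, b) := by
  by_cases hb : 0 < b
  · rw [drain_step ⟨by omega, by omega, hb⟩]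
    norm_num [drain10_5 (b - 1), hb]
  · rw [drain_stop (by omega)]; simp [hb]

theorem drain5_5 (a : Int) : drain 5 5 a = if 0 < a then (0, a - 1) else (5, a) := by
  by_cases ha : 0 < a
  · rw [drain_step ⟨by omega, by omega, ha⟩]
    norm_num [drain_stop (show ¬ (0 < (5:Int) ∧ 5 ≤ 0 ∧ 0 < a - 1) by omega), ha]
  · rw [drain_stop (by omega)]; simp [ha]

theorem drain5_15 (a : Int) :
    drain 5 15 a = if 3 ≤ a then (0, a - 3) else if a = 2 then (5, 0) else if a = 1 then (10, 0) else (15, a) := by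
  by_cases ha : 0 < a
  · rw [drain_step ⟨by omega, by omega, ha⟩]
    norm_num
    by_cases ha2 : 0 < a - 1
    · rw [drain_step ⟨by omega, by omega, ha2⟩]
      norm_num [drain5_5 (a - 1 - 1)]
      split_ifs <;> simp_all [Prod.mk.injEq] <;> omega
    · rw [drain_stop (by omega)]
      split_ifs <;> simp_all [Prod.mk.injEq] <;> omega
  · rw [drain_stop (by omega)]
    split_ifs <;> simp_all [Prod.mk.injEq]
    omega

theorem getD_mkBills_5 (a b c : Int) : (mkBills a b c).getD 5 0 = a := by
  simp [mkBills, PySem.Dict.getD_eq_get?_getD, PySem.Dict.get?_mk_cons]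
theorem getD_mkBills_10 (a b c : Int) : (mkBills a b c).getD 10 0 = b := by
  simp [mkBills, PySem.Dict.getD_eq_get?_getD, PySem.Dict.get?_mk_cons]

theorem mod5 (a b c d0 : Int) (f : Int → Int) : (mkBills a b c).modify 5 d0 f = mkBills (f a) b c := by
  apply PySem.Dict.ext
  simp [mkBills, PySem.Dict.modify, PySem.Dict.items_insert, PySem.Dict.getD_eq_get?_getD, PySem.Dict.get?_mk_cons]

theorem mod10 (a b c d0 : Int) (f : Int → Int) : (mkBills a b c).modify 10 d0 f = mkBills a (f b) c := by
  apply PySem.Dict.ext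
  simp [mkBills, PySem.Dict.modify, PySem.Dict.items_insert, PySem.Dict.getD_eq_get?_getD, PySem.Dict.get?_mk_cons]

theorem mod20 (a b c d0 : Int) (f : Int → Int) : (mkBills a b c).modify 20 d0 f = mkBills a b (f c) := by
  apply PySem.Dict.ext
  simp [mkBills, PySem.Dict.modify, PySem.Dict.items_insert, PySem.Dict.getD_eq_get?_getD, PySem.Dict.get?_mk_cons]

theorem go_eq (l : List Int) : ∀ (a b c : Int),
    lemonGo (mkBills a b c) l = lemonAltGo a b l := by
  induction l with
  | nil => intro a b c; rfl
  | cons p rest ih =>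
    intro a b c
    by_cases h5 : p = 5
    · subst h5
      simp [lemonGo, lemonAltGo, mod5, ih]
    · by_cases h10 : p = 10
      · subst h10
        simp only [lemonGo, lemonAltGo]
        norm_num [getD_mkBills_5, mod5, mod10, drain10_5, drain5_5]
        by_cases ha : 0 < a
        · simp [ha, show (1:Int) ≤ a from by omega, ih]
        · simp [ha, show ¬(1:Int) ≤ a from by omega]
      · by_cases h20 : p = 20
        · subst h20
          simp only [lemonGo, lemonAltGo]
          norm_num [getD_mkBills_5, getD_mkBills_10, mod5, mod10, mod20, drain10_15]
          by_cases hb : 0 < b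
          · rw [if_pos hb]
            norm_num [drain5_5]
            by_cases ha : 0 < a
            · simp [ha, show (1:Int) ≤ a from by omega, show (1:Int) ≤ b from by omega, ih]
            · simp [ha, show ¬(1:Int) ≤ a from by omega, show ¬(3:Int) ≤ a from by omega]
          · rw [if_neg hb]
            norm_num [drain5_15]
            by_cases ha3 : 3 ≤ a
            · simp [ha3, show ¬(1:Int) ≤ b from by omega, ih]
            · simp [ha3, show ¬(1:Int) ≤ b from by omega]
              split_ifs <;> simp
        · have hc5 : p - 5 ≠ 5 := by omega
          have hc15 : p - 5 ≠ 15 := by omega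
          simp [lemonGo, lemonAltGo, h5, h10, h20, hc5, hc15, ih]

theorem lemon_eq_alt (arr : List Int) : lemon arr = lemon_alt arr := by
  have h : (((PySem.Dict.empty.insert 5 0).insert 10 0).insert 20 0 : PySem.Dict Int Int) = mkBills 0 0 0 := by
    decide
  rw [lemon, h, lemon_alt, go_eq]

-- ===== VERDICT (by name: the statement is the Claim_ definition above) =====
theorem lemon_spec : Claim_equal_lemon := by
  intro arr _
  exact lemon_eq_alt arr
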